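-- pv_equiv track=rewrite | github.com/lucastsui/collatz-research | cascade_correlation_verify.py | syracuse_gaps
-- ===== SOURCE A (Python) =====
-- def v2(n):
--     if n == 0: return 999
--     v = 0
--     while n % 2 == 0: n //= 2; v += 1
--     return v
--
-- def syracuse_gaps(n, k):
--     """Compute the k gaps g_0, ..., g_{k-1} of the Syracuse orbit of n."""
--     gaps = []
--     s = n
--     for j in range(k):
--         g = v2(3*s + 1)
--         gaps.append(g)
--         s = (3*s + 1) >> g
--     return gaps, s  # final value S^k(n)
-- ===== SOURCE B (Python) =====
-- def syracuse_gaps(n, k):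
--     """Compute the k gaps g_0, ..., g_{k-1} of the Syracuse orbit of n."""
--     gaps = []
--     s = n
--     for _ in range(k):
--         m = 3 * s + 1
--         g = (m & -m).bit_length() - 1   # 2-adic valuation of m (m != 0 always)
--         gaps.append(g)
--         s = m >> g
--     return gaps, s
-- ===== Notes on version B (the rewrite author's own statement) =====
-- stated objective: idiomatic
-- what changed: The inner while-loop 2-adic valuation helper v2 is replaced by the closed-form bit trick (m & -m).bit_length() - 1, eliminating the helper and its divide loop.
import Mathlib
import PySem

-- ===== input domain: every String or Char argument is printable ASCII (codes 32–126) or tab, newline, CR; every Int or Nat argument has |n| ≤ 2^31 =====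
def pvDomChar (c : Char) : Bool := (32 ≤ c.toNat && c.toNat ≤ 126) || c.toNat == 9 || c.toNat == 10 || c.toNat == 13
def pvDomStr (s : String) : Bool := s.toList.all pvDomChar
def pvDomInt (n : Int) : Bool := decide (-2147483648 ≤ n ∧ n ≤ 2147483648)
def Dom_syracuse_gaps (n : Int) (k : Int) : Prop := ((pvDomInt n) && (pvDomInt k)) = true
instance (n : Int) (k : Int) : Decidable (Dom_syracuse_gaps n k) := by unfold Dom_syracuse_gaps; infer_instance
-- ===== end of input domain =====

-- B replaces A's divide-loop valuation helper v2 with the closed-form bit trick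
-- (m & -m).bit_length() - 1 (idiomatic; same outer loop, no inner loop).

-- ===== PORT A =====
-- Python v2's `while n % 2 == 0: n //= 2; v += 1`.  The `n ≠ 0` conjunct in the guard is
-- only the termination guard: v2 enters the loop with n ≠ 0 (it returns 999 at 0) and
-- halving a nonzero even integer never reaches 0, so the loop behaviour is unchanged.
def v2Loop (n : Int) (v : Int) : Int :=
  if h : n ≠ 0 ∧ PySem.Int.mod n 2 = 0 then v2Loop (PySem.Int.floordiv n 2) (v + 1) else v
  termination_by n.natAbs
  decreasing_by
    obtain ⟨hne, hmod⟩ := h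
    obtain ⟨q, rfl⟩ := (PySem.Int.mod_eq_zero_iff_dvd n 2).1 hmod
    rw [PySem.Int.floordiv_eq_ediv_of_pos (by norm_num), Int.mul_ediv_cancel_left q (by norm_num)]
    have : q ≠ 0 := by rintro rfl; simp at hne
    simp only [Int.natAbs_mul, show (2:Int).natAbs = 2 from rfl]
    omega

def v2 (n : Int) : Int := if n = 0 then 999 else v2Loop n 0

def syracuse_gaps (n : Int) (k : Int) : List Int × Int :=
  (PySem.List.pyRange 0 k 1).foldl
    (fun st _ =>
      let g := v2 (3 * st.2 + 1)
      -- Python `(3*s+1) >> g`; v2's result is a nonnegative count, so `.toNat` is exact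
      (st.1 ++ [g], (3 * st.2 + 1) >>> g.toNat))
    ([], n)

-- ===== PORT B =====
def syracuse_gaps_alt (n : Int) (k : Int) : List Int × Int :=
  (PySem.List.pyRange 0 k 1).foldl
    (fun st _ =>
      let m := 3 * st.2 + 1
      let g : Int := (PySem.Int.bitLength (PySem.Int.band m (-m)) : Int) - 1
      -- Python `m >> g`; g ≥ 0 since m ≠ 0, so `.toNat` is exact
      (st.1 ++ [g], m >>> g.toNat))
    ([], n)

-- ===== PRECONDITION & SPEC =====
def Spec_syracuse_gaps (n : Int) (k : Int) (out : List Int × Int) : Prop := out = syracuse_gaps_alt n k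
instance (n : Int) (k : Int) (out : List Int × Int) : Decidable (Spec_syracuse_gaps n k out) := by unfold Spec_syracuse_gaps; infer_instance

-- ===== CLAIM (what is proved, stated in full; the proofs are below) =====
def Claim_equal_syracuse_gaps : Prop := ∀ (n : Int) (k : Int), Dom_syracuse_gaps n k → Spec_syracuse_gaps n k (syracuse_gaps n k)

-- ===== LEMMAS AND PROOFS =====

-- proof-side trailing-zero count on Nat
def tz (n : Nat) : Nat :=
  if h : n % 2 = 0 ∧ n ≠ 0 then tz (n / 2) + 1 else 0
  termination_by n
  decreasing_by exact Nat.div_lt_self (Nat.pos_of_ne_zero h.2) one_lt_two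

theorem tz_double (a : Nat) (ha : a ≠ 0) : tz (2 * a) = tz a + 1 := by
  conv_lhs => rw [tz]
  rw [dif_pos ⟨by omega, by omega⟩, Nat.mul_div_cancel_left _ two_pos]

theorem tz_odd (a : Nat) : tz (2 * a + 1) = 0 := by
  rw [tz, dif_neg (by omega)]

theorem v2Loop_eq : ∀ (N : Nat) (m : Int), m.natAbs = N → m ≠ 0 →
    ∀ v : Int, v2Loop m v = v + (tz m.natAbs : Int) := by
  intro N
  induction N using Nat.strong_induction_on with
  | _ N ih =>
    intro m hN hm v
    rw [v2Loop.eq_1]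
    by_cases hd : (2 : Int) ∣ m
    · obtain ⟨q, rfl⟩ := hd
      have hq : q ≠ 0 := by rintro rfl; simp at hm
      have hmod : PySem.Int.mod (2 * q) 2 = 0 := (PySem.Int.mod_eq_zero_iff_dvd _ _).2 ⟨q, rfl⟩
      rw [dif_pos ⟨hm, hmod⟩]
      have hfd : PySem.Int.floordiv (2 * q) 2 = q := by
        rw [PySem.Int.floordiv_eq_ediv_of_pos (by norm_num)]
        exact Int.mul_ediv_cancel_left q (by norm_num)
      rw [hfd, ih q.natAbs (by subst hN; simp only [Int.natAbs_mul, show (2:Int).natAbs = 2 from rfl]; omega) q rfl hq (v + 1)]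
      have h2 : (2 * q).natAbs = 2 * q.natAbs := by simp [Int.natAbs_mul]
      have hq' : q.natAbs ≠ 0 := by omega
      rw [h2, tz_double q.natAbs hq']
      push_cast; ring
    · have hmod : PySem.Int.mod m 2 ≠ 0 := fun h => hd ((PySem.Int.mod_eq_zero_iff_dvd m 2).1 h)
      rw [dif_neg (fun h => hmod h.2)]
      have hodd : m.natAbs % 2 ≠ 0 := by
        intro h
        exact hd (Int.natAbs_dvd_natAbs.1 (Nat.dvd_of_mod_eq_zero h) : (2 : Int) ∣ m)
      conv_rhs => rw [tz]
      rw [dif_neg (fun h => hodd h.1)]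
      simp

-- clearing the lowest set bit:  (2a+1) &&& (2b) = 2*(a &&& b)  on Nat
theorem and_odd_even (a b : Nat) : (2 * a + 1) &&& (2 * b) = 2 * (a &&& b) := by
  apply Nat.eq_of_testBit_eq
  intro i
  cases i with
  | zero => simp [Nat.testBit_zero, Nat.mul_mod_right]
  | succ j =>
      simp only [Nat.testBit_add_one]
      rw [Nat.testBit_div_two, Nat.testBit_land, Nat.testBit_add_one, Nat.testBit_add_one]
      simp [Nat.mul_add_div two_pos, Nat.mul_div_cancel_left _ two_pos]

theorem lowbit_eq : ∀ (N n : Nat), n = N → n ≠ 0 → n - (n &&& (n - 1)) = 2 ^ tz n := by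
  intro N
  induction N using Nat.strong_induction_on with
  | _ N ih =>
    intro n hN hn
    rcases Nat.even_or_odd n with he | ho
    · obtain ⟨a, rfl⟩ := he
      have ha : a ≠ 0 := by omega
      have h1 : a + a = 2 * a := by ring
      rw [h1] at hn ⊢
      have hsub : 2 * a - 1 = 2 * (a - 1) + 1 := by omega
      have hand : 2 * a &&& (2 * a - 1) = 2 * (a &&& (a - 1)) := by
        rw [hsub, Nat.land_comm, and_odd_even, Nat.land_comm]
      rw [hand, ← Nat.mul_sub, ih a (by omega) a rfl ha, tz_double a ha, Nat.pow_succ]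
      ring
    · obtain ⟨a, rfl⟩ := ho
      have h1 : 2 * a + 1 - 1 = 2 * a := by omega
      rw [h1, and_odd_even, Nat.and_self, tz_odd, pow_zero]
      omega

-- PySem.Int.band m (-m) as the Nat lowest-bit expression
theorem band_neg_self (m : Int) (hm : m ≠ 0) :
    PySem.Int.band m (-m) = ((m.natAbs - (m.natAbs &&& (m.natAbs - 1)) : Nat) : Int) := by
  rcases lt_trichotomy m 0 with h | h | h
  · rw [PySem.Int.band, if_neg (by omega), if_pos (by omega)]
    have h1 : (-m).toNat = m.natAbs := by omega
    have h2 : (-m - 1).toNat = m.natAbs - 1 := by omega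
    rw [h1, h2]
  · exact absurd h hm
  · rw [PySem.Int.band, if_pos (by omega), if_neg (by omega)]
    have h1 : m.toNat = m.natAbs := by omega
    have h2 : (- -m - 1).toNat = m.natAbs - 1 := by omega
    rw [h1, h2]

theorem bitLength_two_pow (g : Nat) : PySem.Int.bitLength ((2 ^ g : Nat) : Int) = g + 1 := by
  induction g with
  | zero => decide
  | succ j ih =>
      have hdiv : 2 ^ (j + 1) / 2 = 2 ^ j := by rw [Nat.pow_succ, Nat.mul_div_cancel _ two_pos]
      rw [PySem.Int.bitLength_natCast (m := 2 ^ (j + 1)) (by positivity), hdiv, ih]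

theorem gap_eq (s : Int) :
    v2 (3 * s + 1) = (PySem.Int.bitLength (PySem.Int.band (3 * s + 1) (-(3 * s + 1))) : Int) - 1 := by
  have hm : (3 * s + 1) ≠ 0 := by omega
  rw [v2, if_neg hm, v2Loop_eq (3 * s + 1).natAbs _ rfl hm 0,
    band_neg_self _ hm, lowbit_eq (3 * s + 1).natAbs _ rfl (by omega), bitLength_two_pow]
  push_cast; omega

theorem step_eq :
    (fun (st : List Int × Int) (_ : Int) =>
        let g := v2 (3 * st.2 + 1)
        (st.1 ++ [g], (3 * st.2 + 1) >>> g.toNat)) =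
    (fun (st : List Int × Int) (_ : Int) =>
        let m := 3 * st.2 + 1
        let g : Int := (PySem.Int.bitLength (PySem.Int.band m (-m)) : Int) - 1
        (st.1 ++ [g], m >>> g.toNat)) := by
  funext st x
  simp only [gap_eq st.2]

-- ===== VERDICT (by name: the statement is the Claim_ definition above) =====
theorem syracuse_gaps_spec : Claim_equal_syracuse_gaps := by
  intro n k _
  unfold Spec_syracuse_gaps syracuse_gaps syracuse_gaps_alt
  rw [step_eq]
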